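-- pv_equiv track=rewrite | github.com/WalvisChris/Python-Practice | phone_book.py | find_in_phonebook
-- ===== SOURCE A (Python) =====
-- phonebook = [['Max', 2895374491, 'Detroit'],
--              ['Angela', 1928553692, 'Paris'],
--              ['Greg', 9271655473, 'London']]
--
-- def find_in_phonebook(target):
--     target = int(target) if target.isdigit() else str(target).lower() if isinstance(target, str) else target
--     for i, person in enumerate(phonebook):
--         for data in person:
--             data = str(data).lower() if isinstance(target, str) else data
--             if data == target:
--                 return i
--     return -1
-- ===== SOURCE B (Python) =====
-- phonebook = [['Max', 2895374491, 'Detroit'],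
--              ['Angela', 1928553692, 'Paris'],
--              ['Greg', 9271655473, 'London']]
--
-- # Prebuilt index: one pass over the phonebook at module load; first occurrence wins.
-- _int_lookup = {}
-- _str_lookup = {}
-- for _i, _person in enumerate(phonebook):
--     for _d in _person:
--         if isinstance(_d, int):
--             _int_lookup.setdefault(_d, _i)
--         _str_lookup.setdefault(str(_d).lower(), _i)
--
-- def find_in_phonebook(target):
--     if target.isdigit():
--         return _int_lookup.get(int(target), -1)
--     return _str_lookup.get(str(target).lower(), -1)
-- ===== Notes on version B (the rewrite author's own statement) =====
-- stated objective: idiomatic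
-- what changed: Replaces the nested scan over the phonebook on every call with dict indexes (raw int fields and lowercased string fields, first occurrence wins) built once at module load, so the lookup is a single dict.get.
import Mathlib
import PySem

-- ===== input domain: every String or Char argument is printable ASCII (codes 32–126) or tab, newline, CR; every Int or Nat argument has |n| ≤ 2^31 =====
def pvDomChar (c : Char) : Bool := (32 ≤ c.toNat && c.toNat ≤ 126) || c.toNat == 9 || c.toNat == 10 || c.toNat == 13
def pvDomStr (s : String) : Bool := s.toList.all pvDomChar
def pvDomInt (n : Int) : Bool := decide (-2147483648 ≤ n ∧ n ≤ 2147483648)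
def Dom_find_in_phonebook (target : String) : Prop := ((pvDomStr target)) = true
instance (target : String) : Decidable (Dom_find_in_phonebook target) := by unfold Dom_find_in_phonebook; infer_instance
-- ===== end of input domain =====

-- B replaces A's nested scan over the phonebook with a dict index built once at module load
-- plus a single lookup (idiomatic; return value only, the phonebook itself is never mutated).

-- A phonebook field: either a string (name/city) or an int (phone number).
inductive PField
  | s : String → PField
  | n : Int → PField
deriving DecidableEq, Repr

-- ===== PORT A =====
def pbook : List (List PField) :=
  [[.s "Max", .n 2895374491, .s "Detroit"],
   [.s "Angela", .n 1928553692, .s "Paris"],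
   [.s "Greg", .n 9271655473, .s "London"]]

-- `data = str(data).lower() if isinstance(target, str) else data`
def aNormData (targetIsStr : Bool) (d : PField) : PField :=
  if targetIsStr then
    match d with
    | .s v => .s (PySem.Str.lower v)
    | .n k => .s (PySem.Str.lower (PySem.Int.toStr k))
  else d

-- inner `for data in person: … if data == target: return i` (true = matched)
def aRow (targetIsStr : Bool) (t : PField) : List PField → Bool
  | [] => false
  | d :: rest => if aNormData targetIsStr d = t then true else aRow targetIsStr t rest

-- outer `for i, person in enumerate(phonebook)`
def aScan (targetIsStr : Bool) (t : PField) (i : Int) : List (List PField) → Int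
  | [] => -1
  | person :: rest =>
      if aRow targetIsStr t person then i else aScan targetIsStr t (i + 1) rest

def find_in_phonebook (target : String) : Int :=
  -- target = int(target) if target.isdigit() else str(target).lower()  (target is a str here)
  if PySem.Str.strIsdigit target then
    -- isdigit ⇒ int(target) succeeds; getD 0 is unreachable
    aScan false (.n ((PySem.Int.ofStr? target).getD 0)) 0 pbook
  else
    aScan true (.s (PySem.Str.lower target)) 0 pbook

-- ===== PORT B =====
-- dict.setdefault(k, v): insert only if the key is absent (first occurrence wins)
def dsetdefault {κ ν : Type} [BEq κ] (d : PySem.Dict κ ν) (k : κ) (v : ν) : PySem.Dict κ ν :=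
  if (d.get? k).isSome then d else d.insert k v

-- module-load pass: _int_lookup over raw int fields, _str_lookup over str(field).lower()
def bTables : PySem.Dict Int Int × PySem.Dict String Int :=
  (PySem.List.enumerate pbook).foldl
    (fun tabs ip =>
      ip.2.foldl
        (fun (tabs : PySem.Dict Int Int × PySem.Dict String Int) d =>
          match d with
          | .n k => (dsetdefault tabs.1 k ip.1,
                     dsetdefault tabs.2 (PySem.Str.lower (PySem.Int.toStr k)) ip.1)
          | .s v => (tabs.1, dsetdefault tabs.2 (PySem.Str.lower v) ip.1))
        tabs)
    (PySem.Dict.empty, PySem.Dict.empty)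

def find_in_phonebook_alt (target : String) : Int :=
  if PySem.Str.strIsdigit target then
    bTables.1.getD ((PySem.Int.ofStr? target).getD 0) (-1)
  else
    bTables.2.getD (PySem.Str.lower target) (-1)

-- ===== PRECONDITION & SPEC =====
def Spec_find_in_phonebook (target : String) (out : Int) : Prop := out = find_in_phonebook_alt target
instance (target : String) (out : Int) : Decidable (Spec_find_in_phonebook target out) := by unfold Spec_find_in_phonebook; infer_instance

-- ===== CLAIM (what is proved, stated in full; the proofs are below) =====
def Claim_equal_find_in_phonebook : Prop := ∀ (target : String), Dom_find_in_phonebook target → Spec_find_in_phonebook target (find_in_phonebook target)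

-- ===== LEMMAS AND PROOFS =====
lemma bTables_eq : bTables =
    (PySem.Dict.mk [(2895374491, 0), (1928553692, 1), (9271655473, 2)],
     PySem.Dict.mk [("max", 0), ("2895374491", 0), ("detroit", 0),
                    ("angela", 1), ("1928553692", 1), ("paris", 1),
                    ("greg", 2), ("9271655473", 2), ("london", 2)]) := by decide

lemma int_branch (k : Int) : aScan false (.n k) 0 pbook = bTables.1.getD k (-1) := by
  rw [bTables_eq]
  simp only [aScan, aRow, aNormData, pbook, PySem.Dict.getD, PySem.Dict.get?_mk_cons]
  simp only [PySem.Dict.get?, if_false, reduceCtorEq]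
  split_ifs <;> simp_all

lemma str_branch (s : String) : aScan true (.s s) 0 pbook = bTables.2.getD s (-1) := by
  rw [bTables_eq]
  by_cases h1 : s = "max"
  · subst h1; decide
  by_cases h2 : s = "2895374491"
  · subst h2; decide
  by_cases h3 : s = "detroit"
  · subst h3; decide
  by_cases h4 : s = "angela"
  · subst h4; decide
  by_cases h5 : s = "1928553692"
  · subst h5; decide
  by_cases h6 : s = "paris"
  · subst h6; decide
  by_cases h7 : s = "greg"
  · subst h7; decide
  by_cases h8 : s = "9271655473"
  · subst h8; decide
  by_cases h9 : s = "london"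
  · subst h9; decide
  simp [aScan, aRow, aNormData, pbook, PySem.Dict.getD, PySem.Dict.get?,
    show PySem.Str.lower "Max" = "max" from by decide,
    show PySem.Str.lower (PySem.Int.toStr 2895374491) = "2895374491" from by decide,
    show PySem.Str.lower "Detroit" = "detroit" from by decide,
    show PySem.Str.lower "Angela" = "angela" from by decide,
    show PySem.Str.lower (PySem.Int.toStr 1928553692) = "1928553692" from by decide,
    show PySem.Str.lower "Paris" = "paris" from by decide,
    show PySem.Str.lower "Greg" = "greg" from by decide,
    show PySem.Str.lower (PySem.Int.toStr 9271655473) = "9271655473" from by decide,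
    show PySem.Str.lower "London" = "london" from by decide,
    Ne.symm h1, Ne.symm h2, Ne.symm h3, Ne.symm h4, Ne.symm h5,
    Ne.symm h6, Ne.symm h7, Ne.symm h8, Ne.symm h9]

-- ===== VERDICT (by name: the statement is the Claim_ definition above) =====
theorem find_in_phonebook_spec : Claim_equal_find_in_phonebook := by
  intro target _
  unfold Spec_find_in_phonebook find_in_phonebook find_in_phonebook_alt
  split_ifs
  · exact int_branch _
  · exact str_branch _
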